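-- pv_equiv track=rewrite | github.com/christinabranson/codingame-fall-2024 | main1.py | build_bidirectional_path
-- ===== SOURCE A (Python) =====
-- def build_bidirectional_path(buildings):
--     # Step 1: Create an adjacency list for bidirectional connections
--     from collections import defaultdict
--
--     adjacency_list = defaultdict(list)
--     for building1, building2 in buildings:
--         adjacency_list[building1].append(building2)
--         adjacency_list[building2].append(building1)
--
--     # Step 2: Start from any building, say building 0 or first in the input, and traverse the graph
--     start_building = buildings[0][0]
--     path = []
--     visited = set()
--
--     def traverse(building):
--         path.append(building)
--         visited.add(building)
--
--         # Visit all connected buildings that have not yet been visited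
--         for neighbor in adjacency_list[building]:
--             if neighbor not in visited:
--                 traverse(neighbor)
--                 path.append(
--                     building
--                 )  # Backtrack to the current building after visiting a neighbor
--
--     traverse(start_building)
--
--     # debug(path)
--
--     return path
-- ===== SOURCE B (Python) =====
-- def build_bidirectional_path(buildings):
--     # Iterative DFS with an explicit stack of (node, next-neighbor-index) frames
--     # instead of recursion; same adjacency construction and visit order.
--     from collections import defaultdict
--
--     adjacency_list = defaultdict(list)
--     for building1, building2 in buildings:
--         adjacency_list[building1].append(building2)
--         adjacency_list[building2].append(building1)
--
--     start = buildings[0][0]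
--     path = [start]
--     visited = {start}
--     stack = [(start, 0)]
--     while stack:
--         node, i = stack[-1]
--         neighbors = adjacency_list[node]
--         while i < len(neighbors) and neighbors[i] in visited:
--             i += 1
--         if i < len(neighbors):
--             nbr = neighbors[i]
--             stack[-1] = (node, i + 1)
--             visited.add(nbr)
--             path.append(nbr)
--             stack.append((nbr, 0))
--         else:
--             stack.pop()
--             if stack:
--                 path.append(stack[-1][0])
--     return path
-- ===== Notes on version B (the rewrite author's own statement) =====
-- stated objective: alternative
-- what changed: The recursive traverse with backtrack appends is replaced by an explicit-stack iterative DFS whose frames are (node, next-neighbor-index) pairs; the backtrack re-append happens on frame pop instead of on return from recursion.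
import Mathlib
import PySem

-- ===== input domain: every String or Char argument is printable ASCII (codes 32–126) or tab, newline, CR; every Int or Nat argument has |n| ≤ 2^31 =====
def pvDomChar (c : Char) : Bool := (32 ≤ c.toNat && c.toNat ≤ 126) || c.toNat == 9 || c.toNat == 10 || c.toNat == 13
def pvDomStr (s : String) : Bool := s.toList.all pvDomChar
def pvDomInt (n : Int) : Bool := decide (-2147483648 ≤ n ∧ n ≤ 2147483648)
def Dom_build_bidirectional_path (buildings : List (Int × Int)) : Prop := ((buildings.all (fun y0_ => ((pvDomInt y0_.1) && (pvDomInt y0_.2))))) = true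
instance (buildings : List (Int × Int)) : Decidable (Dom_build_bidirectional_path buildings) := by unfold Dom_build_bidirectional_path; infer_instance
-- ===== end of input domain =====

-- B replaces A's recursive DFS-with-backtracking by an explicit-stack iterative DFS
-- (frames = (node, remaining neighbors)); same return value, no recursion (objective: alternative).

-- Shared step 1 of both Pythons: the defaultdict(list) adjacency construction.
def pvAdjStep (d : PySem.Dict Int (List Int)) (p : Int × Int) : PySem.Dict Int (List Int) :=
  (d.modify p.1 [] (fun l => l ++ [p.2])).modify p.2 [] (fun l => l ++ [p.1])

def pvAdj (buildings : List (Int × Int)) : PySem.Dict Int (List Int) :=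
  buildings.foldl pvAdjStep PySem.Dict.empty

-- ===== PORT A =====
-- A's recursive traverse; the for-loop over adjacency_list[building] is pvGoA.
-- Fuel is only a totality guard: each call visits a new node and there are at most
-- 2*len distinct nodes, so with fuel 2*len+1 the `none` branch is unreachable.
mutual
def pvTravA (adj : PySem.Dict Int (List Int)) :
    Nat → Int → List Int × PySem.Set Int → Option (List Int × PySem.Set Int)
  | 0, _, _ => none
  | n+1, b, (path, vis) => pvGoA adj n b (adj.getD b []) (path ++ [b], PySem.Set.add vis b)
  termination_by n _ _ => (n, 0)

def pvGoA (adj : PySem.Dict Int (List Int)) :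
    Nat → Int → List Int → List Int × PySem.Set Int → Option (List Int × PySem.Set Int)
  | _, _, [], st => some st
  | n, b, nbr :: rest, (path, vis) =>
    if PySem.Set.contains vis nbr then pvGoA adj n b rest (path, vis)
    else
      match pvTravA adj n nbr (path, vis) with
      | none => none
      | some (p', v') => pvGoA adj n b rest (p' ++ [b], v')
  termination_by n _ l _ => (n, l.length + 1)
end

def build_bidirectional_path (buildings : List (Int × Int)) : List Int :=
  let adj := pvAdj buildings
  match PySem.List.pyGet? buildings 0 with
  | none => []  -- buildings[0] raises IndexError; excluded by Pre_
  | some bd =>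
    match pvTravA adj (2 * buildings.length + 1) bd.1 ([], PySem.Set.empty) with
    | some st => st.1
    | none => []  -- fuel guard, unreachable

-- ===== PORT B =====
-- B's inner `while i < len(neighbors) and neighbors[i] in visited: i += 1`
-- (a frame (node, i) is represented as (node, suffix of neighbors from index i)).
def pvSkip (vis : PySem.Set Int) : List Int → List Int
  | [] => []
  | x :: r => if PySem.Set.contains vis x then pvSkip vis r else x :: r

-- B's `while stack:` loop; fuel counts iterations (a totality guard only).
def pvLoopB (adj : PySem.Dict Int (List Int)) :
    Nat → List (Int × List Int) → List Int × PySem.Set Int → Option (List Int × PySem.Set Int)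
  | _, [], st => some st
  | 0, _ :: _, _ => none
  | f+1, (b, l) :: rest, (path, vis) =>
    match pvSkip vis l with
    | nbr :: l' =>
        pvLoopB adj f ((nbr, adj.getD nbr []) :: (b, l') :: rest)
          (path ++ [nbr], PySem.Set.add vis nbr)
    | [] =>
      match rest with
      | [] => some (path, vis)
      | (b', _) :: _ => pvLoopB adj f rest (path ++ [b'], vis)

def build_bidirectional_path_alt (buildings : List (Int × Int)) : List Int :=
  let adj := pvAdj buildings
  match PySem.List.pyGet? buildings 0 with
  | none => []  -- buildings[0] raises IndexError; excluded by Pre_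
  | some bd =>
    let start := bd.1
    match pvLoopB adj (4 * buildings.length + 2) [(start, adj.getD start [])]
        ([start], PySem.Set.add PySem.Set.empty start) with
    | some st => st.1
    | none => []  -- fuel guard, unreachable

-- ===== PRECONDITION & SPEC =====
-- Pre_ excludes only the empty list, on which A (buildings[0]) raises IndexError.
def Pre_build_bidirectional_path (buildings : List (Int × Int)) : Prop := buildings ≠ []
instance (buildings : List (Int × Int)) : Decidable (Pre_build_bidirectional_path buildings) := by
  unfold Pre_build_bidirectional_path; infer_instance

def pvWitness_build_bidirectional_path : (List (Int × Int)) := [(1, 2)]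

def Spec_build_bidirectional_path (buildings : List (Int × Int)) (out : List Int) : Prop := out = build_bidirectional_path_alt buildings
instance (buildings : List (Int × Int)) (out : List Int) : Decidable (Spec_build_bidirectional_path buildings out) := by unfold Spec_build_bidirectional_path; infer_instance

-- ===== CLAIM (what is proved, stated in full; the proofs are below) =====
def Claim_equal_build_bidirectional_path : Prop := ∀ (buildings : List (Int × Int)), Dom_build_bidirectional_path buildings → Pre_build_bidirectional_path buildings → Spec_build_bidirectional_path buildings (build_bidirectional_path buildings)

-- ===== LEMMAS AND PROOFS =====

-- All node values occurring in `buildings`, as a set (distinct, first-insertion order).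
def pvNodes (buildings : List (Int × Int)) : List Int :=
  PySem.Set.ofList (buildings.flatMap (fun p => [p.1, p.2]))

-- number of elements of U not yet visited
def pvUnvis (U : List Int) (vis : PySem.Set Int) : Nat :=
  U.countP (fun x => !PySem.Set.contains vis x)

-- the backtrack re-append performed by B when a frame is popped and the stack is nonempty
def pvBk (rest : List (Int × List Int)) (st : List Int × PySem.Set Int) :
    List Int × PySem.Set Int :=
  match rest with
  | [] => st
  | (b', _) :: _ => (st.1 ++ [b'], st.2)

lemma pvLoopB_nil (adj : PySem.Dict Int (List Int)) (f : Nat) (st : List Int × PySem.Set Int) :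
    pvLoopB adj f [] st = some st := by cases f <;> rfl

lemma pvLoopB_succ (adj : PySem.Dict Int (List Int)) (f : Nat) (b : Int) (l : List Int)
    (rest : List (Int × List Int)) (path : List Int) (vis : PySem.Set Int) :
    pvLoopB adj (f+1) ((b, l) :: rest) (path, vis)
      = match pvSkip vis l with
        | nbr :: l' =>
            pvLoopB adj f ((nbr, adj.getD nbr []) :: (b, l') :: rest)
              (path ++ [nbr], PySem.Set.add vis nbr)
        | [] =>
          match rest with
          | [] => some (path, vis)
          | (b', _) :: _ => pvLoopB adj f rest (path ++ [b'], vis) := rfl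

lemma pvContains_false {s : PySem.Set Int} {x : Int}
    (h : PySem.Set.contains s x = false) : x ∉ s := by
  intro hm
  rw [(PySem.Set.contains_iff _ _).mpr hm] at h
  exact Bool.noConfusion h

lemma pvContains_of_not_mem {s : PySem.Set Int} {x : Int} (h : x ∉ s) :
    PySem.Set.contains s x = false := by
  cases hc : PySem.Set.contains s x
  · rfl
  · exact absurd ((PySem.Set.contains_iff _ _).mp hc) h

lemma pvContains_add_eq (vis : PySem.Set Int) (b x : Int) (hxb : x ≠ b) :
    PySem.Set.contains (PySem.Set.add vis b) x = PySem.Set.contains vis x := by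
  by_cases h : x ∈ vis
  · rw [(PySem.Set.contains_iff _ _).mpr h,
      (PySem.Set.contains_iff _ _).mpr ((PySem.Set.mem_add _ _ _).mpr (Or.inl h))]
  · rw [pvContains_of_not_mem h, pvContains_of_not_mem
      (fun hm => ((PySem.Set.mem_add _ _ _).mp hm).elim h hxb)]

lemma pvUnvis_le (U : List Int) (vis vis' : PySem.Set Int)
    (h : ∀ x ∈ vis, x ∈ vis') : pvUnvis U vis' ≤ pvUnvis U vis := by
  apply List.countP_mono_left
  intro x _ hp
  by_cases hv : x ∈ vis
  · rw [(PySem.Set.contains_iff _ _).mpr (h x hv)] at hp; exact Bool.noConfusion hp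
  · rw [pvContains_of_not_mem hv]; rfl

lemma pvUnvis_pos (U : List Int) (vis : PySem.Set Int) (b : Int)
    (hb : b ∈ U) (hnb : b ∉ vis) : 0 < pvUnvis U vis := by
  have hb' : (!PySem.Set.contains vis b) = true := by
    rw [pvContains_of_not_mem hnb]; rfl
  have hne : U.countP (fun x => !PySem.Set.contains vis x) ≠ 0 := by
    intro h0
    exact absurd hb' (by simpa using List.countP_eq_zero.mp h0 b hb)
  unfold pvUnvis
  omega

lemma pvUnvis_le_length (U : List Int) (vis : PySem.Set Int) :
    pvUnvis U vis ≤ U.length := by unfold pvUnvis; exact List.countP_le_length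

lemma pvUnvis_add (U : List Int) (vis : PySem.Set Int) (b : Int)
    (hU : U.Nodup) (hb : b ∈ U) (hnb : b ∉ vis) :
    pvUnvis U (PySem.Set.add vis b) + 1 = pvUnvis U vis := by
  unfold pvUnvis
  induction U with
  | nil => cases hb
  | cons u t ih =>
    rw [List.countP_cons, List.countP_cons]
    by_cases hub : u = b
    · subst hub
      have hbt : u ∉ t := (List.nodup_cons.mp hU).1
      have hcongr : t.countP (fun x => !PySem.Set.contains (PySem.Set.add vis u) x)
          = t.countP (fun x => !PySem.Set.contains vis x) := by
        apply List.countP_congr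
        intro x hx
        rw [pvContains_add_eq vis u x (fun he => hbt (he ▸ hx))]
      rw [hcongr,
        (PySem.Set.contains_iff _ _).mpr ((PySem.Set.mem_add _ _ _).mpr (Or.inr rfl)),
        pvContains_of_not_mem hnb]
      simp
    · rcases List.mem_cons.mp hb with h | hbt
      · exact absurd h.symm hub
      · rw [pvContains_add_eq vis b u (fun he => hub he)]
        have := ih (List.nodup_cons.mp hU).2 hbt
        omega

lemma pvAdjStep_getD_mem (d : PySem.Dict Int (List Int)) (p : Int × Int) (b x : Int)
    (hx : x ∈ (pvAdjStep d p).getD b []) :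
    x ∈ d.getD b [] ∨ x = p.1 ∨ x = p.2 := by
  simp only [pvAdjStep, PySem.Dict.getD_modify] at hx
  split_ifs at hx <;>
      (try simp only [List.mem_append, List.mem_singleton] at hx) <;>
      (try subst_vars) <;> (try simp_all) <;> tauto

lemma pvAdj_aux (Q : Int → Prop) :
    ∀ (L : List (Int × Int)) (d : PySem.Dict Int (List Int)),
      (∀ b x, x ∈ d.getD b [] → Q x) →
      (∀ p ∈ L, Q p.1 ∧ Q p.2) →
      ∀ b x, x ∈ (L.foldl pvAdjStep d).getD b [] → Q x := by
  intro L
  induction L with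
  | nil => intro d hd _ b x hx; exact hd b x hx
  | cons p t ih =>
    intro d hd hQ b x hx
    refine ih (pvAdjStep d p) ?_ (fun q hq => hQ q (List.mem_cons_of_mem _ hq)) b x hx
    intro b' x' hx'
    rcases pvAdjStep_getD_mem d p b' x' hx' with h | h | h
    · exact hd b' x' h
    · exact h ▸ (hQ p (List.mem_cons_self)).1
    · exact h ▸ (hQ p (List.mem_cons_self)).2

lemma pvAdj_sub (buildings : List (Int × Int)) :
    ∀ b x, x ∈ (pvAdj buildings).getD b [] → x ∈ pvNodes buildings := by
  intro b x hx
  refine pvAdj_aux (fun y => y ∈ pvNodes buildings) buildings PySem.Dict.empty ?_ ?_ b x hx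
  · intro b' x' hx'
    rw [PySem.Dict.getD_empty] at hx'
    cases hx'
  · intro p hp
    have h1 : p.1 ∈ pvNodes buildings := by
      unfold pvNodes
      exact (PySem.Set.mem_ofList _ _).mpr (List.mem_flatMap.mpr ⟨p, hp, by simp⟩)
    have h2 : p.2 ∈ pvNodes buildings := by
      unfold pvNodes
      exact (PySem.Set.mem_ofList _ _).mpr (List.mem_flatMap.mpr ⟨p, hp, by simp⟩)
    exact ⟨h1, h2⟩

lemma pvFlatLen (L : List (Int × Int)) :
    (L.flatMap (fun p => [p.1, p.2])).length = 2 * L.length := by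
  induction L with
  | nil => rfl
  | cons p t ih => simp only [List.flatMap_cons, List.length_append, List.length_cons, ih]; simp; omega

-- A-side invariant: if trav/go return, the visited set only grew (and b was added).
lemma pvSub (adj : PySem.Dict Int (List Int)) : ∀ n : Nat,
    (∀ b path vis p' v', pvTravA adj n b (path, vis) = some (p', v') →
       ((∀ x, x ∈ vis → x ∈ v') ∧ b ∈ v'))
  ∧ (∀ b l path vis p' v', pvGoA adj n b l (path, vis) = some (p', v') →
       ∀ x, x ∈ vis → x ∈ v') := by
  intro n
  induction n with
  | zero =>
    constructor
    · intro b path vis p' v' h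
      simp [pvTravA] at h
    · intro b l
      induction l with
      | nil =>
        intro path vis p' v' h x hx
        simp only [pvGoA, Option.some.injEq, Prod.mk.injEq] at h
        obtain ⟨-, rfl⟩ := h
        exact hx
      | cons nbr t iht =>
        intro path vis p' v' h x hx
        rw [pvGoA] at h
        cases hc : PySem.Set.contains vis nbr
        · simp only [hc, Bool.false_eq_true, if_false] at h
          rw [pvTravA] at h
          simp at h
        · simp only [hc, if_true] at h
          exact iht path vis p' v' h x hx
  | succ n ih =>
    have P : ∀ b path vis p' v', pvTravA adj (n+1) b (path, vis) = some (p', v') →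
        ((∀ x, x ∈ vis → x ∈ v') ∧ b ∈ v') := by
      intro b path vis p' v' h
      rw [pvTravA] at h
      have hsub := ih.2 b _ _ _ _ _ h
      exact ⟨fun x hx => hsub x ((PySem.Set.mem_add _ _ _).mpr (Or.inl hx)),
        hsub b ((PySem.Set.mem_add _ _ _).mpr (Or.inr rfl))⟩
    refine ⟨P, ?_⟩
    intro b l
    induction l with
    | nil =>
      intro path vis p' v' h x hx
      simp only [pvGoA, Option.some.injEq, Prod.mk.injEq] at h
      obtain ⟨-, rfl⟩ := h
      exact hx
    | cons nbr t iht =>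
      intro path vis p' v' h x hx
      rw [pvGoA] at h
      cases hc : PySem.Set.contains vis nbr
      · simp only [hc, Bool.false_eq_true, if_false] at h
        cases htr : pvTravA adj (n+1) nbr (path, vis) with
        | none => rw [htr] at h; cases h
        | some st1 =>
          obtain ⟨p₁, v₁⟩ := st1
          rw [htr] at h
          exact iht _ _ _ _ h x ((P nbr path vis p₁ v₁ htr).1 x hx)
      · simp only [hc, if_true] at h
        exact iht path vis p' v' h x hx

-- A-side totality: with fuel ≥ the number of unvisited universe nodes, trav/go return.
lemma pvTotal (adj : PySem.Dict Int (List Int)) (U : List Int) (hU : U.Nodup)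
    (hadj : ∀ b x, x ∈ adj.getD b [] → x ∈ U) : ∀ n : Nat,
    (∀ b path vis, b ∈ U → b ∉ vis → pvUnvis U vis ≤ n →
       (pvTravA adj n b (path, vis)).isSome)
  ∧ (∀ b l path vis, (∀ x ∈ l, x ∈ U) → pvUnvis U vis ≤ n →
       (pvGoA adj n b l (path, vis)).isSome) := by
  intro n
  induction n with
  | zero =>
    constructor
    · intro b path vis hb hnb hle
      exact absurd hle (by have := pvUnvis_pos U vis b hb hnb; omega)
    · intro b l
      induction l with
      | nil => intro path vis _ _; simp [pvGoA]
      | cons nbr t iht =>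
        intro path vis hl hle
        rw [pvGoA]
        cases hc : PySem.Set.contains vis nbr
        · exact absurd hle (by
            have := pvUnvis_pos U vis nbr (hl nbr (List.mem_cons_self))
              (pvContains_false hc)
            omega)
        · simp only [if_true]
          exact iht path vis (fun x hx => hl x (List.mem_cons_of_mem _ hx)) hle
  | succ n ih =>
    have P : ∀ b path vis, b ∈ U → b ∉ vis → pvUnvis U vis ≤ n + 1 →
        (pvTravA adj (n+1) b (path, vis)).isSome := by
      intro b path vis hb hnb hle
      rw [pvTravA]
      apply ih.2 b _ _ _ (fun x hx => hadj b x hx)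
      have := pvUnvis_add U vis b hU hb hnb
      omega
    refine ⟨P, ?_⟩
    intro b l
    induction l with
    | nil => intro path vis _ _; simp [pvGoA]
    | cons nbr t iht =>
      intro path vis hl hle
      rw [pvGoA]
      cases hc : PySem.Set.contains vis nbr
      · simp only [Bool.false_eq_true, if_false]
        have hnbU : nbr ∈ U := hl nbr (List.mem_cons_self)
        have hnvis : nbr ∉ vis := pvContains_false hc
        have htr := P nbr path vis hnbU hnvis hle
        obtain ⟨⟨p₁, v₁⟩, heq⟩ := Option.isSome_iff_exists.mp htr
        rw [heq]
        have hsub := ((pvSub adj (n+1)).1 nbr path vis p₁ v₁ heq).1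
        exact iht _ _ (fun x hx => hl x (List.mem_cons_of_mem _ hx))
          (le_trans (pvUnvis_le U vis v₁ hsub) hle)
      · simp only [if_true]
        exact iht path vis (fun x hx => hl x (List.mem_cons_of_mem _ hx)) hle

lemma pvLoopB_mono (adj : PySem.Dict Int (List Int)) :
    ∀ f f' s st r, pvLoopB adj f s st = some r → f ≤ f' →
      pvLoopB adj f' s st = some r := by
  intro f
  induction f with
  | zero =>
    intro f' s st r h _
    cases s with
    | nil => rw [pvLoopB_nil] at h ⊢; exact h
    | cons fr rest =>
      obtain ⟨b, l⟩ := fr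
      obtain ⟨path, vis⟩ := st
      exact absurd h (by rw [show pvLoopB adj 0 ((b,l)::rest) (path,vis) = none from rfl]; simp)
  | succ f ihf =>
    intro f' s st r h hle
    cases s with
    | nil => rw [pvLoopB_nil] at h ⊢; exact h
    | cons fr rest =>
      obtain ⟨b, l⟩ := fr
      obtain ⟨path, vis⟩ := st
      obtain ⟨f'', rfl⟩ : ∃ f'', f' = f'' + 1 := ⟨f' - 1, by omega⟩
      rw [pvLoopB_succ] at h ⊢
      cases hs : pvSkip vis l with
      | cons nbr l' =>
        simp only [hs] at h ⊢
        exact ihf f'' _ _ _ h (by omega)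
      | nil =>
        simp only [hs] at h ⊢
        cases rest with
        | nil => exact h
        | cons g t =>
          obtain ⟨b', t'⟩ := g
          exact ihf f'' _ _ _ h (by omega)

lemma pvLoopB_skip (adj : PySem.Dict Int (List Int)) (vis : PySem.Set Int)
    (nbr b : Int) (l : List Int) (path : List Int) (rest : List (Int × List Int))
    (h : PySem.Set.contains vis nbr = true) :
    ∀ g, pvLoopB adj g ((b, nbr :: l) :: rest) (path, vis)
        = pvLoopB adj g ((b, l) :: rest) (path, vis) := by
  intro g
  cases g with
  | zero => rfl
  | succ g => rw [pvLoopB_succ, pvLoopB_succ]; simp only [pvSkip, h, if_true]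

-- The correspondence: after B finishes the top frame (b, l) it is in the popped,
-- backtrack-appended configuration; fuel spent is exactly 1 + 2 * (new nodes visited).
lemma pvCorr (adj : PySem.Dict Int (List Int)) (U : List Int) (hU : U.Nodup)
    (hadj : ∀ b x, x ∈ adj.getD b [] → x ∈ U) :
    ∀ n : Nat, ∀ l b path vis p' v' rest f r,
      (∀ x ∈ l, x ∈ U) →
      pvGoA adj n b l (path, vis) = some (p', v') →
      pvLoopB adj f rest (pvBk rest (p', v')) = some r →
      pvLoopB adj (f + 1 + 2 * (pvUnvis U vis - pvUnvis U v'))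
        ((b, l) :: rest) (path, vis) = some r := by
  intro n
  induction n using Nat.strong_induction_on with
  | _ n IH =>
  intro l
  induction l with
  | nil =>
    intro b path vis p' v' rest f r _ hgo hlp
    simp only [pvGoA, Option.some.injEq, Prod.mk.injEq] at hgo
    obtain ⟨rfl, rfl⟩ := hgo
    simp only [Nat.sub_self, Nat.mul_zero, Nat.add_zero]
    rw [pvLoopB_succ]
    cases rest with
    | nil =>
      rw [pvLoopB_nil] at hlp
      simp only [pvBk, Option.some.injEq] at hlp
      simp only [pvSkip]
      rw [hlp]
    | cons g t =>
      obtain ⟨b', t'⟩ := g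
      simp only [pvSkip]
      simpa only [pvBk] using hlp
  | cons nbr t iht =>
    intro b path vis p' v' rest f r hl hgo hlp
    rw [pvGoA] at hgo
    cases hc : PySem.Set.contains vis nbr
    · simp only [hc, Bool.false_eq_true, if_false] at hgo
      cases htr : pvTravA adj n nbr (path, vis) with
      | none => rw [htr] at hgo; cases hgo
      | some st1 =>
        obtain ⟨p₁, v₁⟩ := st1
        rw [htr] at hgo
        have hnbU : nbr ∈ U := hl nbr (List.mem_cons_self)
        have hnvis : nbr ∉ vis := pvContains_false hc
        cases n with
        | zero => rw [pvTravA] at htr; exact absurd htr (by simp)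
        | succ m =>
          rw [pvTravA] at htr
          have hsub1 : ∀ x ∈ PySem.Set.add vis nbr, x ∈ v₁ :=
            (pvSub adj m).2 nbr _ _ _ _ _ htr
          have hsub2 : ∀ x ∈ v₁, x ∈ v' := (pvSub adj (m+1)).2 b t _ _ _ _ hgo
          have ha1 : pvUnvis U (PySem.Set.add vis nbr) + 1 = pvUnvis U vis :=
            pvUnvis_add U vis nbr hU hnbU hnvis
          have ha2 : pvUnvis U v₁ ≤ pvUnvis U (PySem.Set.add vis nbr) :=
            pvUnvis_le U _ _ hsub1
          have ha3 : pvUnvis U v' ≤ pvUnvis U v₁ := pvUnvis_le U _ _ hsub2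
          have H1 := iht b (p₁ ++ [b]) v₁ p' v' rest f r
            (fun x hx => hl x (List.mem_cons_of_mem _ hx)) hgo hlp
          have H1' : pvLoopB adj (f + 1 + 2 * (pvUnvis U v₁ - pvUnvis U v'))
              ((b, t) :: rest) (pvBk ((b, t) :: rest) (p₁, v₁)) = some r := by
            simpa only [pvBk] using H1
          have H2 := IH m (by omega) (adj.getD nbr []) nbr (path ++ [nbr])
            (PySem.Set.add vis nbr) p₁ v₁ ((b, t) :: rest)
            (f + 1 + 2 * (pvUnvis U v₁ - pvUnvis U v')) r
            (fun x hx => hadj nbr x hx) htr H1'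
          have hG : f + 1 + 2 * (pvUnvis U vis - pvUnvis U v')
              = (f + 1 + 2 * (pvUnvis U v₁ - pvUnvis U v') + 1
                 + 2 * (pvUnvis U (PySem.Set.add vis nbr) - pvUnvis U v₁)) + 1 := by
            omega
          rw [hG, pvLoopB_succ]
          simp only [pvSkip, hc, Bool.false_eq_true, if_false]
          exact H2
    · simp only [hc, if_true] at hgo
      rw [pvLoopB_skip adj vis nbr b t path rest hc]
      exact iht b path vis p' v' rest f r
        (fun x hx => hl x (List.mem_cons_of_mem _ hx)) hgo hlp

-- ===== VERDICT (by name: the statement is the Claim_ definition above) =====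
theorem build_bidirectional_path_spec : Claim_equal_build_bidirectional_path := by
  intro buildings _ hpre
  unfold Spec_build_bidirectional_path
  cases buildings with
  | nil => exact absurd rfl hpre
  | cons bd tl =>
    have hadj := pvAdj_sub (bd :: tl)
    have hU : (pvNodes (bd :: tl)).Nodup := by
      unfold pvNodes; exact PySem.Set.nodup_ofList _
    have hstart : bd.1 ∈ pvNodes (bd :: tl) := by
      unfold pvNodes
      rw [PySem.Set.mem_ofList]
      exact List.mem_flatMap.mpr ⟨bd, List.mem_cons_self, by simp⟩
    have hlenU : (pvNodes (bd :: tl)).length ≤ 2 * (bd :: tl).length := by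
      have h1 := PySem.Set.length_ofList_le ((bd :: tl).flatMap (fun p => [p.1, p.2]))
      have h2 := pvFlatLen (bd :: tl)
      unfold pvNodes
      omega
    have hempty : (PySem.Set.empty : PySem.Set Int) = [] := rfl
    have hunvis0 : pvUnvis (pvNodes (bd :: tl)) PySem.Set.empty
        = (pvNodes (bd :: tl)).length := by
      apply List.countP_eq_length.mpr
      intro x _
      rw [pvContains_of_not_mem (by rw [hempty]; exact List.not_mem_nil)]
      rfl
    have htot := (pvTotal (pvAdj (bd :: tl)) (pvNodes (bd :: tl)) hU hadj
        (2 * (bd :: tl).length + 1)).1 bd.1 [] PySem.Set.empty hstart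
      (by rw [hempty]; exact List.not_mem_nil) (by omega)
    obtain ⟨st, hA⟩ := Option.isSome_iff_exists.mp htot
    obtain ⟨p', v'⟩ := st
    have hadd : PySem.Set.add PySem.Set.empty bd.1 = [bd.1] := by
      rw [PySem.Set.add_of_not_mem (by rw [hempty]; exact List.not_mem_nil), hempty]
      rfl
    have hA' : pvGoA (pvAdj (bd :: tl)) (2 * (bd :: tl).length) bd.1
        ((pvAdj (bd :: tl)).getD bd.1 []) ([bd.1], [bd.1]) = some (p', v') := by
      rw [pvTravA] at hA
      simpa only [List.nil_append, hadd] using hA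
    have hbase : pvLoopB (pvAdj (bd :: tl)) 0 [] (pvBk [] (p', v')) = some (p', v') := by
      rw [pvLoopB_nil]
      rfl
    have hcorr := pvCorr (pvAdj (bd :: tl)) (pvNodes (bd :: tl)) hU hadj
      (2 * (bd :: tl).length) ((pvAdj (bd :: tl)).getD bd.1 []) bd.1 [bd.1] [bd.1]
      p' v' [] 0 (p', v') (fun x hx => hadj bd.1 x hx) hA' hbase
    have hB := pvLoopB_mono (pvAdj (bd :: tl)) _ (4 * (bd :: tl).length + 2) _ _ _ hcorr
      (by
        have h1 := pvUnvis_le_length (pvNodes (bd :: tl)) [bd.1]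
        omega)
    show build_bidirectional_path (bd :: tl) = build_bidirectional_path_alt (bd :: tl)
    unfold build_bidirectional_path build_bidirectional_path_alt
    simp only [PySem.List.pyGet?_zero_cons, hadd, hA, hB]
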